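-- pv_equiv track=rewrite | github.com/Fede-Rausa/Instaronno | app.py | get_club_unanimity
-- ===== SOURCE A (Python) =====
-- def get_club_unanimity(club, friends_list):
--     user = club[0]
--     commons = {b for a, b in friends_list if a == user} | {a for a, b in friends_list if b == user}
--     for i in range(len(club)):
--         user = club[i]
--         user_friends = {b for a, b in friends_list if a == user} | {a for a, b in friends_list if b == user}
--         commons = user_friends.intersection(commons)
--
--     list_of_friends = [(u,v) for (u,v) in friends_list if (((u in club) or (u in commons)) and ((v in club) or (v in commons)))]
--
--     return list_of_friends
-- ===== SOURCE B (Python) =====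
-- def get_club_unanimity(club, friends_list):
--     adj = {}
--     for a, b in friends_list:
--         adj.setdefault(a, set()).add(b)
--         adj.setdefault(b, set()).add(a)
--     commons = set(adj.get(club[0], set()))
--     for m in club[1:]:
--         commons &= adj.get(m, set())
--     keep = set(club) | commons
--     return [(u, v) for (u, v) in friends_list if u in keep and v in keep]
-- ===== Notes on version B (the rewrite author's own statement) =====
-- stated objective: faster
-- what changed: B builds an adjacency dict of neighbor sets in one pass over the edges and intersects the club members' precomputed neighbor sets, instead of rescanning the whole edge list twice per club member; the final filter tests one merged keep-set.
import Mathlib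
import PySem

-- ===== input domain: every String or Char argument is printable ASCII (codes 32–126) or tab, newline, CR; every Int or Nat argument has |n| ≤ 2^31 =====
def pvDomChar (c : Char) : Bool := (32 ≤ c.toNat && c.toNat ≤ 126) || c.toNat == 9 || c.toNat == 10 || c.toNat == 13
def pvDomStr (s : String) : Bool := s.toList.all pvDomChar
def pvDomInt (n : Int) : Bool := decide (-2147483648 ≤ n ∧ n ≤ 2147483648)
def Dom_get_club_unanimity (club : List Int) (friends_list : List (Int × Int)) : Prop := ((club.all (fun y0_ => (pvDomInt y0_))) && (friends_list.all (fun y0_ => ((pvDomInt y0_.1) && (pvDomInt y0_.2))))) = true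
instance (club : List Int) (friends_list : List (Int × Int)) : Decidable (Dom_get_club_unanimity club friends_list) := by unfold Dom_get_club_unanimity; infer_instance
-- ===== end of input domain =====

-- B replaces A's per-member rescans of the edge list by an adjacency dict built once (objective: faster).

-- ===== PORT A =====
-- A's repeated set-comprehension pair {b | a==user} | {a | b==user}, used both before and inside the loop
def pvNbrs (friends_list : List (Int × Int)) (user : Int) : PySem.Set Int :=
  PySem.Set.union
    (PySem.Set.ofList ((friends_list.filter (fun p => p.1 == user)).map (fun p => p.2)))
    ((friends_list.filter (fun p => p.2 == user)).map (fun p => p.1))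

def get_club_unanimity (club : List Int) (friends_list : List (Int × Int)) : List (Int × Int) :=
  match club with
  | [] => []  -- Python raises IndexError at club[0]; excluded by Pre_
  | c0 :: _ =>
    let commons0 := pvNbrs friends_list c0
    let commons := club.foldl (fun c user => PySem.Set.inter (pvNbrs friends_list user) c) commons0
    friends_list.filter (fun p =>
      (club.contains p.1 || commons.contains p.1) && (club.contains p.2 || commons.contains p.2))

-- ===== PORT B =====
-- adj.setdefault(a, set()).add(b); adj.setdefault(b, set()).add(a)
def pvAdjStep (d : PySem.Dict Int (PySem.Set Int)) (p : Int × Int) : PySem.Dict Int (PySem.Set Int) :=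
  (d.modify p.1 [] (fun s => PySem.Set.add s p.2)).modify p.2 [] (fun s => PySem.Set.add s p.1)

def get_club_unanimity_alt (club : List Int) (friends_list : List (Int × Int)) : List (Int × Int) :=
  match club with
  | [] => []  -- Python raises IndexError at club[0]; excluded by Pre_
  | c0 :: rest =>
    let adj := friends_list.foldl pvAdjStep PySem.Dict.empty
    let commons := rest.foldl (fun c m => PySem.Set.inter c (adj.getD m [])) (adj.getD c0 [])
    let keep := PySem.Set.union (PySem.Set.ofList club) commons
    friends_list.filter (fun p => keep.contains p.1 && keep.contains p.2)

-- ===== PRECONDITION & SPEC =====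
-- Both programs index club[0]: on an empty club A raises IndexError, so Pre_ requires a nonempty club.
def Pre_get_club_unanimity (club : List Int) (friends_list : List (Int × Int)) : Prop := club ≠ []
instance (club : List Int) (friends_list : List (Int × Int)) : Decidable (Pre_get_club_unanimity club friends_list) := by unfold Pre_get_club_unanimity; infer_instance
def pvWitness_get_club_unanimity : List Int × (List (Int × Int)) := ([1, 2], [(1, 2), (1, 3), (2, 3)])

def Spec_get_club_unanimity (club : List Int) (friends_list : List (Int × Int)) (out : List (Int × Int)) : Prop := out = get_club_unanimity_alt club friends_list
instance (club : List Int) (friends_list : List (Int × Int)) (out : List (Int × Int)) : Decidable (Spec_get_club_unanimity club friends_list out) := by unfold Spec_get_club_unanimity; infer_instance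

-- ===== CLAIM (what is proved, stated in full; the proofs are below) =====
def Claim_equal_get_club_unanimity : Prop := ∀ (club : List Int) (friends_list : List (Int × Int)), Dom_get_club_unanimity club friends_list → Pre_get_club_unanimity club friends_list → Spec_get_club_unanimity club friends_list (get_club_unanimity club friends_list)

-- ===== LEMMAS AND PROOFS =====

-- membership in A's neighbor set
theorem pv_mem_nbrs (fl : List (Int × Int)) (u x : Int) :
    x ∈ pvNbrs fl u ↔ (u, x) ∈ fl ∨ (x, u) ∈ fl := by
  simp only [pvNbrs, PySem.Set.mem_union, PySem.Set.mem_ofList, List.mem_map, List.mem_filter]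
  constructor
  · rintro (⟨p, ⟨hp, he⟩, rfl⟩ | ⟨p, ⟨hp, he⟩, rfl⟩)
    · left; simpa [← (beq_iff_eq.mp he)] using hp
    · right; simpa [← (beq_iff_eq.mp he)] using hp
  · rintro (h | h)
    · exact Or.inl ⟨(u, x), ⟨h, by simp⟩, rfl⟩
    · exact Or.inr ⟨(x, u), ⟨h, by simp⟩, rfl⟩

-- membership in B's adjacency dict after folding the edges
theorem pv_mem_adj (fl : List (Int × Int)) (d : PySem.Dict Int (PySem.Set Int)) (m x : Int) :
    x ∈ (fl.foldl pvAdjStep d).getD m [] ↔ x ∈ d.getD m [] ∨ (m, x) ∈ fl ∨ (x, m) ∈ fl := by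
  induction fl generalizing d with
  | nil => simp
  | cons p t ih =>
    obtain ⟨a, b⟩ := p
    simp only [List.foldl_cons, ih, List.mem_cons, pvAdjStep, PySem.Dict.getD_modify]
    split_ifs with hb ha ha <;>
      simp_all [PySem.Set.mem_add, Prod.ext_iff] <;> tauto

-- membership in A's intersection loop
theorem pv_foldl_inter_A (l : List Int) (nf : Int → PySem.Set Int) (init : PySem.Set Int) (x : Int) :
    x ∈ l.foldl (fun c u => PySem.Set.inter (nf u) c) init ↔ x ∈ init ∧ ∀ u ∈ l, x ∈ nf u := by
  induction l generalizing init with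
  | nil => simp
  | cons h t ih => simp [ih, PySem.Set.mem_inter]; tauto

-- membership in B's intersection loop
theorem pv_foldl_inter_B (l : List Int) (g : Int → PySem.Set Int) (init : PySem.Set Int) (x : Int) :
    x ∈ l.foldl (fun c m => PySem.Set.inter c (g m)) init ↔ x ∈ init ∧ ∀ m ∈ l, x ∈ g m := by
  induction l generalizing init with
  | nil => simp
  | cons h t ih => simp [ih, PySem.Set.mem_inter]; tauto

-- ===== VERDICT (by name: the statement is the Claim_ definition above) =====
theorem get_club_unanimity_spec : Claim_equal_get_club_unanimity := by
  intro club fl _hdom hpre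
  unfold Spec_get_club_unanimity
  match club, hpre with
  | c0 :: rest, _ =>
    simp only [get_club_unanimity, get_club_unanimity_alt]
    apply List.filter_congr
    intro p _hp
    have key : ∀ y : Int,
        ((c0 :: rest).contains y
          || ((c0 :: rest).foldl (fun c u => PySem.Set.inter (pvNbrs fl u) c)
               (pvNbrs fl c0)).contains y)
        = (PySem.Set.union (PySem.Set.ofList (c0 :: rest))
            (rest.foldl (fun c m => PySem.Set.inter c ((fl.foldl pvAdjStep PySem.Dict.empty).getD m []))
              ((fl.foldl pvAdjStep PySem.Dict.empty).getD c0 []))).contains y := by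
      intro y
      have hA : y ∈ (c0 :: rest).foldl (fun c u => PySem.Set.inter (pvNbrs fl u) c) (pvNbrs fl c0)
          ↔ y ∈ pvNbrs fl c0 ∧ ∀ u ∈ rest, y ∈ pvNbrs fl u := by
        rw [pv_foldl_inter_A]; simp
      have hB : y ∈ rest.foldl (fun c m => PySem.Set.inter c ((fl.foldl pvAdjStep PySem.Dict.empty).getD m []))
            ((fl.foldl pvAdjStep PySem.Dict.empty).getD c0 [])
          ↔ y ∈ pvNbrs fl c0 ∧ ∀ u ∈ rest, y ∈ pvNbrs fl u := by
        rw [pv_foldl_inter_B]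
        have hadj : ∀ m : Int, y ∈ (fl.foldl pvAdjStep PySem.Dict.empty).getD m [] ↔ y ∈ pvNbrs fl m := by
          intro m; rw [pv_mem_adj, pv_mem_nbrs, PySem.Dict.getD_empty]; simp
        simp only [hadj]
      rw [Bool.eq_iff_iff]
      simp only [Bool.or_eq_true, List.contains_eq_mem, decide_eq_true_eq,
        PySem.Set.contains_iff, PySem.Set.mem_union, PySem.Set.mem_ofList]
      rw [hA, hB]
    rw [key p.1, key p.2]
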